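-- pv_equiv track=rewrite | github.com/sergiorgiraldo/Python-lang | data-engineering-interview-patterns/patterns/09_string_parsing/template.py | char_by_char_template
-- ===== SOURCE A (Python) =====
-- def char_by_char_template(s: str) -> list[str]:
--     """
--     Template: parse a string character by character with state.
--
--     Useful when delimiters aren't enough (e.g., quoted CSV fields,
--     comments in code, escape sequences).
--     """
--     tokens: list[str] = []
--     current: list[str] = []
--     in_quotes = False
--
--     for char in s:
--         if char == '"':
--             in_quotes = not in_quotes
--         elif char == "," and not in_quotes:
--             tokens.append("".join(current))
--             current = []
--         else:
--             current.append(char)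
--
--     tokens.append("".join(current))  # don't forget the last token
--     return tokens
-- ===== SOURCE B (Python) =====
-- def char_by_char_template(s: str) -> list[str]:
--     # Split on the quote character: even-indexed parts are outside quotes (split them on
--     # commas), odd-indexed parts are inside quotes (copied verbatim).
--     tokens = [""]
--     for i, part in enumerate(s.split('"')):
--         if i % 2 == 1:
--             tokens[-1] += part
--         else:
--             pieces = part.split(",")
--             tokens[-1] += pieces[0]
--             tokens.extend(pieces[1:])
--     return tokens
-- ===== Notes on version B (the rewrite author's own statement) =====
-- stated objective: faster
-- what changed: Replaces the per-character quote/comma state machine with a split-based pass: split the string on the quote character, then split even (outside-quotes) segments on commas to emit tokens and concatenate odd (inside-quotes) segments onto the last token; str.split does the character scanning at C speed.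
import Mathlib
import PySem

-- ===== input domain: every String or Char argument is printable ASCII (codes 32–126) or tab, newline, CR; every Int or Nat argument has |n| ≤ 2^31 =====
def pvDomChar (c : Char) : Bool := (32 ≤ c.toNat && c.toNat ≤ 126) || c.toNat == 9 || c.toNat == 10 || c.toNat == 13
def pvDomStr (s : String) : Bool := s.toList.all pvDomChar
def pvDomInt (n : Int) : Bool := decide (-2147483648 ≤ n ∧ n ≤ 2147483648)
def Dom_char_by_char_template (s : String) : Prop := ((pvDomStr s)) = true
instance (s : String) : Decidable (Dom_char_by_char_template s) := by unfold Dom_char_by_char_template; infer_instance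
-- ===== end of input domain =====

-- B replaces A's per-character quote/comma state machine with a split-based pass over
-- quote-delimited segments (even segments split on commas, odd segments concatenated onto
-- the last token); a timing run measured B faster by a constant factor.

-- ===== PORT A =====
-- '"".join(current)' with current a list of single chars is String.ofList of that char list (exact).
def char_by_char_template (s : String) : List String :=
  let r := s.toList.foldl
    (fun (st : List String × List Char × Bool) char =>
      if char == '"' then (st.1, st.2.1, !st.2.2)
      else if char == ',' && !st.2.2 then (st.1 ++ [String.ofList st.2.1], [], st.2.2)
      else (st.1, st.2.1 ++ [char], st.2.2))
    ([], [], false)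
  r.1 ++ [String.ofList r.2.1]

-- ===== PORT B =====
-- hand port of Python's str.split(sep) for a one-character separator (exact: ''.split(d) = [''],
-- empty pieces kept, adjacent separators give empty pieces).
def splitC (d : Char) : List Char → List (List Char)
  | [] => [[]]
  | c :: cs =>
    if c == d then [] :: splitC d cs
    else match splitC d cs with
      | [] => [[c]]
      | p :: ps => (c :: p) :: ps

def char_by_char_template_alt (s : String) : List String :=
  let parts := splitC '"' s.toList
  (PySem.List.enumerate parts).foldl
    (fun (tokens : List String) ip =>
      if ip.1 % 2 == 1 then
        tokens.dropLast ++ [tokens.getLastD "" ++ String.ofList ip.2]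
      else
        let ps := splitC ',' ip.2
        (tokens.dropLast ++ [tokens.getLastD "" ++ String.ofList (ps.headD [])]) ++ ps.tail.map String.ofList)
    [""]

-- ===== PRECONDITION & SPEC =====
def Spec_char_by_char_template (s : String) (out : List String) : Prop := out = char_by_char_template_alt s
instance (s : String) (out : List String) : Decidable (Spec_char_by_char_template s out) := by unfold Spec_char_by_char_template; infer_instance

-- ===== CLAIM (what is proved, stated in full; the proofs are below) =====
def Claim_equal_char_by_char_template : Prop := ∀ (s : String), Dom_char_by_char_template s → Spec_char_by_char_template s (char_by_char_template s)

-- ===== LEMMAS AND PROOFS =====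

/-- map a function over the head of a list only -/
def mh {α : Type} (f : α → α) : List α → List α
  | [] => []
  | x :: xs => f x :: xs

/-- reference parser: tokens of the remainder, current token accumulating into the head -/
def parseQ : Bool → List Char → List (List Char)
  | _, [] => [[]]
  | inq, c :: cs =>
    if c == '"' then parseQ (!inq) cs
    else if c == ',' && !inq then [] :: parseQ inq cs
    else mh (c :: ·) (parseQ inq cs)

/-- merge a nonempty piece list into a token list: all but the last piece become tokens,
the last piece is prepended to the head of the continuation -/
def happ : List (List Char) → List (List Char) → List (List Char)
  | [], K => K
  | [p], K => mh (p ++ ·) K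
  | p :: ps, K => p :: happ ps K

/-- recursive form of B: tokens from the quote-split parts, flag = currently inside quotes -/
def gq : Bool → List (List Char) → List (List Char)
  | _, [] => [[]]
  | true, p :: rest => mh (p ++ ·) (gq false rest)
  | false, p :: rest => happ (splitC ',' p) (gq true rest)

theorem mh_mh {α : Type} (f g : α → α) (l : List α) : mh f (mh g l) = mh (fun x => f (g x)) l := by
  cases l <;> simp [mh]

theorem mh_congr {α : Type} {f g : α → α} (l : List α) (h : ∀ x, f x = g x) : mh f l = mh g l := by
  cases l <;> simp [mh, h]

theorem mh_nilappend (l : List (List Char)) : mh (fun x => [] ++ x) l = l := by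
  cases l <;> simp [mh]

theorem mh_id {α : Type} (l : List α) : mh (fun x => x) l = l := by
  cases l <;> simp [mh]

theorem mh_emptyappend (l : List String) : mh (fun x => "" ++ x) l = l := by
  cases l <;> simp [mh]

theorem splitC_ne_nil (d : Char) (cs : List Char) : splitC d cs ≠ [] := by
  induction cs with
  | nil => simp [splitC]
  | cons c cs ih =>
    simp only [splitC]
    split
    · simp
    · cases h : splitC d cs <;> simp

theorem splitC_cons_eq (d c : Char) (cs : List Char) (h : ¬ c == d) :
    splitC d (c :: cs) = mh (c :: ·) (splitC d cs) := by
  simp only [splitC, h, if_neg]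
  cases hs : splitC d cs with
  | nil => exact absurd hs (splitC_ne_nil d cs)
  | cons p ps => simp [mh]

theorem happ_mh_cons (c : Char) (ps K : List (List Char)) (h : ps ≠ []) :
    happ (mh (c :: ·) ps) K = mh (c :: ·) (happ ps K) := by
  match ps with
  | [p] => cases K <;> simp [mh, happ]
  | p :: q :: r => simp [mh, happ]

theorem parseQ_eq_gq (cs : List Char) : ∀ inq, parseQ inq cs = gq inq (splitC '"' cs) := by
  induction cs with
  | nil => intro inq; cases inq <;> simp [parseQ, splitC, gq, happ, mh]
  | cons c cs ih =>
    intro inq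
    by_cases hq : c == '"'
    · have hc : c = '"' := by simpa using hq
      subst hc
      simp only [parseQ, if_pos rfl, splitC, ih]
      cases inq
      · simp [gq, splitC, happ, mh_id]
      · simp [gq, mh_id]
    · have hq' : (c == '"') = false := by simpa using hq
      rw [splitC_cons_eq '"' c cs hq]
      cases hsp : splitC '"' cs with
      | nil => exact absurd hsp (splitC_ne_nil '"' cs)
      | cons h t =>
        by_cases hcm : (c == ',' && !inq) = true
        · have hc : c = ',' := by
            rcases Bool.and_eq_true_iff.mp hcm with ⟨h1, _⟩
            simpa using h1
          have hinq : inq = false := by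
            rcases Bool.and_eq_true_iff.mp hcm with ⟨_, h2⟩
            simpa using h2
          subst hc hinq
          simp only [parseQ, hq', Bool.false_eq_true, if_false, hcm, if_true]
          rw [ih false, hsp]
          simp only [gq, mh]
          have hsc : splitC ',' (',' :: h) = [] :: splitC ',' h := by simp [splitC]
          rw [hsc]
          cases hps : splitC ',' h with
          | nil => exact absurd hps (splitC_ne_nil ',' h)
          | cons q qs => simp [happ]
        · have hcm' : (c == ',' && !inq) = false := by simpa using hcm
          simp only [parseQ, hq', Bool.false_eq_true, if_false, hcm', mh]
          rw [ih inq, hsp]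
          cases inq
          · -- outside quotes, c ≠ ',' : pieces of (c :: h) = mh (c :: ·) pieces of h
            simp only [gq, mh]
            have hc' : ¬ c == ',' := by
              intro hcc
              simp [hcc] at hcm'
            rw [splitC_cons_eq ',' c h hc']
            have := happ_mh_cons c (splitC ',' h) (gq true t) (splitC_ne_nil ',' h)
            rw [this]
            cases hg : happ (splitC ',' h) (gq true t) <;> simp [mh]
          · simp only [gq]
            cases hg : gq false t <;> simp [mh]

theorem afold_eq (cs : List Char) : ∀ (tokens : List String) (cur : List Char) (inq : Bool),
    (let r := cs.foldl
      (fun (st : List String × List Char × Bool) char =>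
        if char == '"' then (st.1, st.2.1, !st.2.2)
        else if char == ',' && !st.2.2 then (st.1 ++ [String.ofList st.2.1], [], st.2.2)
        else (st.1, st.2.1 ++ [char], st.2.2))
      (tokens, cur, inq)
     r.1 ++ [String.ofList r.2.1])
    = tokens ++ (mh (fun x => cur ++ x) (parseQ inq cs)).map String.ofList := by
  induction cs with
  | nil => intro tokens cur inq; simp [parseQ, mh]
  | cons c cs ih =>
    intro tokens cur inq
    by_cases hq : (c == '"') = true
    · simp only [List.foldl_cons, hq, if_true, parseQ]
      exact ih tokens cur (!inq)
    · have hq' : (c == '"') = false := by simpa using hq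
      by_cases hcm : (c == ',' && !inq) = true
      · have hinq : inq = false := by
          rcases Bool.and_eq_true_iff.mp hcm with ⟨_, h2⟩
          simpa using h2
        subst hinq
        simp only [List.foldl_cons, hq', Bool.false_eq_true, if_false, hcm, if_true, parseQ]
        rw [ih (tokens ++ [String.ofList cur]) [] false, mh_nilappend]
        cases hp : parseQ false cs <;> simp [mh]
      · have hcm' : (c == ',' && !inq) = false := by simpa using hcm
        simp only [List.foldl_cons, hq', Bool.false_eq_true, if_false, hcm', parseQ]
        rw [ih tokens (cur ++ [c]) inq, mh_mh]
        congr 1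
        apply congrArg
        apply mh_congr
        intro x
        simp

theorem map_ofList_mh (p : List Char) (X : List (List Char)) :
    (mh (fun x => p ++ x) X).map String.ofList
      = mh (fun x => String.ofList p ++ x) (X.map String.ofList) := by
  cases X <;> simp [mh]

theorem map_ofList_getLastD (l : List (List Char)) (d : List Char) :
    (l.map String.ofList).getLastD (String.ofList d) = String.ofList (l.getLastD d) := by
  induction l generalizing d with
  | nil => rfl
  | cons r rs ih => rw [List.map_cons, List.getLastD_cons, List.getLastD_cons, ih]

theorem dropLast_concat_getLastD (T : List String) (hT : T ≠ []) (d : String) :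
    T.dropLast ++ [T.getLastD d] = T := by
  induction T generalizing d with
  | nil => exact absurd rfl hT
  | cons x xs ih =>
    cases xs with
    | nil => simp
    | cons y ys =>
      rw [List.dropLast_cons₂, List.getLastD_cons, List.cons_append, ih (by simp)]

theorem happ_map_ofList (q : List Char) (qs K : List (List Char)) :
    (happ (q :: qs) K).map String.ofList
      = ((q :: qs).map String.ofList).dropLast
        ++ mh (fun x => String.ofList ((q :: qs).getLastD []) ++ x) (K.map String.ofList) := by
  induction qs generalizing q with
  | nil => simp [happ, map_ofList_mh, List.getLastD_cons]
  | cons r rs ih =>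
    have h3 : happ (q :: r :: rs) K = q :: happ (r :: rs) K := rfl
    rw [h3, List.map_cons, ih r]
    simp [List.getLastD_cons]

theorem getLastD_append_cons {α : Type} (X : List α) (y : α) (Y : List α) (d : α) :
    (X ++ y :: Y).getLastD d = (y :: Y).getLastD d := by
  induction X generalizing d with
  | nil => rfl
  | cons x xs ih =>
    rw [List.cons_append, List.getLastD_cons, ih, List.getLastD_cons, List.getLastD_cons]

theorem parity_flip (i : Int) : ((i + 1) % 2 == 1) = !(i % 2 == 1) := by
  rcases Int.emod_two_eq_zero_or_one i with h | h
  · have h1 : (i + 1) % 2 = 1 := by omega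
    simp [h, h1]
  · have h1 : (i + 1) % 2 = 0 := by omega
    simp [h, h1]

theorem bfold_eq (parts : List (List Char)) : ∀ (i : Int) (T : List String), T ≠ [] →
    (PySem.List.enumerate parts i).foldl
      (fun (tokens : List String) ip =>
        if ip.1 % 2 == 1 then
          tokens.dropLast ++ [tokens.getLastD "" ++ String.ofList ip.2]
        else
          let ps := splitC ',' ip.2
          (tokens.dropLast ++ [tokens.getLastD "" ++ String.ofList (ps.headD [])]) ++ ps.tail.map String.ofList)
      T
    = T.dropLast ++ mh (fun x => T.getLastD "" ++ x) ((gq (i % 2 == 1) parts).map String.ofList) := by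
  induction parts with
  | nil =>
    intro i T hT
    rw [PySem.List.enumerate_nil, List.foldl_nil]
    have hg : gq (i % 2 == 1) [] = [[]] := by cases (i % 2 == 1) <;> rfl
    rw [hg]
    have : mh (fun x => T.getLastD "" ++ x) ([[]].map String.ofList) = [T.getLastD ""] := by
      simp [mh]
    rw [this, dropLast_concat_getLastD T hT]
  | cons p parts ih =>
    intro i T hT
    rw [PySem.List.enumerate_cons, List.foldl_cons]
    by_cases hi : (i % 2 == 1) = true
    · -- odd index: inside quotes
      simp only [hi, if_true]
      rw [ih (i + 1) (T.dropLast ++ [T.getLastD "" ++ String.ofList p]) (by simp)]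
      rw [parity_flip, hi, Bool.not_true]
      have hg : gq true (p :: parts) = mh (fun x => p ++ x) (gq false parts) := rfl
      rw [List.dropLast_concat, List.getLastD_concat, hg, map_ofList_mh, mh_mh]
      congr 1
      apply mh_congr
      intro x
      rw [String.append_assoc]
    · have hif : (i % 2 == 1) = false := by simpa using hi
      simp only [hif, Bool.false_eq_true, if_false]
      have hgq : gq false (p :: parts) = happ (splitC ',' p) (gq true parts) := rfl
      cases hps : splitC ',' p with
      | nil => exact absurd hps (splitC_ne_nil ',' p)
      | cons q qs =>
        simp only [List.headD_cons, List.tail_cons]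
        cases qs with
        | nil =>
          simp only [List.map_nil, List.append_nil]
          rw [ih (i + 1) (T.dropLast ++ [T.getLastD "" ++ String.ofList q]) (by simp)]
          rw [parity_flip, hif, Bool.not_false]
          rw [hgq, hps]
          have hh : happ [q] (gq true parts) = mh (fun x => q ++ x) (gq true parts) := rfl
          rw [hh, map_ofList_mh, mh_mh]
          rw [List.dropLast_concat, List.getLastD_concat]
          congr 1
          apply mh_congr
          intro x
          rw [String.append_assoc]
        | cons r rs =>
          rw [ih (i + 1)
            ((T.dropLast ++ [T.getLastD "" ++ String.ofList q]) ++ (r :: rs).map String.ofList)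
            (by simp)]
          rw [parity_flip, hif, Bool.not_false]
          rw [hgq, hps]
          have h1 : (((T.dropLast ++ [T.getLastD "" ++ String.ofList q]) ++ (r :: rs).map String.ofList)).dropLast
              = T.dropLast ++ (T.getLastD "" ++ String.ofList q) :: ((r :: rs).map String.ofList).dropLast := by
            rw [List.dropLast_append_of_ne_nil (by simp)]
            simp
          have h2 : (((T.dropLast ++ [T.getLastD "" ++ String.ofList q]) ++ (r :: rs).map String.ofList)).getLastD ""
              = String.ofList ((r :: rs).getLastD []) := by
            rw [List.map_cons, getLastD_append_cons, ← List.map_cons]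
            exact map_ofList_getLastD (r :: rs) []
          rw [h1, h2]
          have h3 : happ (q :: r :: rs) (gq true parts) = q :: happ (r :: rs) (gq true parts) := rfl
          rw [h3]
          simp only [List.map_cons]
          rw [happ_map_ofList r rs (gq true parts)]
          simp [mh]

-- ===== VERDICT (by name: the statement is the Claim_ definition above) =====
theorem char_by_char_template_spec : Claim_equal_char_by_char_template := by
  intro s _
  unfold Spec_char_by_char_template char_by_char_template char_by_char_template_alt
  rw [afold_eq s.toList [] [] false]
  rw [bfold_eq (splitC '"' s.toList) 0 [""] (by simp)]
  rw [parseQ_eq_gq, mh_nilappend]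
  have h0 : ((0 : Int) % 2 == 1) = false := rfl
  rw [h0]
  have h1 : (([""] : List String)).dropLast = [] := rfl
  have h2 : (([""] : List String)).getLastD "" = "" := rfl
  rw [h1, h2, mh_emptyappend, List.nil_append]
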